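-- pv_equiv track=rewrite | github.com/text2phenotype/biomed | biomed/genetics/genetics.py | split_genes
-- ===== SOURCE A (Python) =====
-- from typing import List, Tuple
--
-- def split_genes(token: str, token_range: List[int]) -> List[Tuple[str, List[int]]]:
--     """Split a multi-gene token into individual genes."""
--     genes = []
--
--     gene_start = token_range[0]
--     for gene in token.split('/'):
--         gene_end = gene_start + len(gene)
--         genes.append((gene, [gene_start, gene_end]))
--         gene_start = gene_end + 1
--
--     return genes
-- ===== SOURCE B (Python) =====
-- def split_genes(token, token_range):
--     """Split a multi-gene token into individual genes (cursor/find scan)."""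
--     genes = []
--     base = token_range[0]
--     pos = 0
--     rest = token
--     while True:
--         idx = rest.find('/')
--         if idx == -1:
--             genes.append((rest, [base + pos, base + pos + len(rest)]))
--             return genes
--         genes.append((rest[:idx], [base + pos, base + pos + idx]))
--         rest = rest[idx + 1:]
--         pos += idx + 1
-- ===== Notes on version B (the rewrite author's own statement) =====
-- stated objective: alternative
-- what changed: B replaces A's token.split('/') plus a running gene_start accumulator with a cursor scan: it repeatedly finds the next '/' with str.find, emits the slice with its range computed from absolute positions, and continues on the remaining suffix.
import Mathlib
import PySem

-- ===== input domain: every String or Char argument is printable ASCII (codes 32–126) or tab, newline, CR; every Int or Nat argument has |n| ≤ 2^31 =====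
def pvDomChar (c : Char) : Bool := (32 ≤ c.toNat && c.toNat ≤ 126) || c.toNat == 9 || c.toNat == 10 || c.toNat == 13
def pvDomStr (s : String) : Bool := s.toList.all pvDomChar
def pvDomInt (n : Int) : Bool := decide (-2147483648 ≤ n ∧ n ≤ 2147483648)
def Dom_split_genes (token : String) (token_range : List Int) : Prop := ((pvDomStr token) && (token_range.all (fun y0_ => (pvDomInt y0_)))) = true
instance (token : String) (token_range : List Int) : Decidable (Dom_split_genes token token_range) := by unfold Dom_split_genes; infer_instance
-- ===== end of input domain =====

-- B replaces A's split('/')-plus-running-accumulator with a cursor scan (find the next '/',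
-- emit the slice with range from absolute positions, continue on the suffix): alternative decomposition.

-- ===== PORT A =====
def split_genes (token : String) (token_range : List Int) : List (String × List Int) :=
  -- gene_start = token_range[0]; valid under Pre_ (token_range ≠ [])
  let gene_start : Int := PySem.List.pyGetD token_range 0 0
  -- for gene in token.split('/'): … append …
  (((PySem.Str.split? token "/").getD []).foldl
    (fun (st : List (String × List Int) × Int) gene =>
      let gene_end : Int := st.2 + PySem.Str.len gene
      (st.1 ++ [(gene, [st.2, gene_end])], gene_end + 1))
    ([], gene_start)).1

-- ===== PORT B =====
-- B's loop: idx = rest.find('/'); emit rest[:idx] (or all of rest when idx == -1), recurse on rest[idx+1:]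
def splitGenesGo (cs : List Char) (base : Int) : List (String × List Int) :=
  let idx := PySem.Chars.find cs ['/']
  if h : idx = -1 then
    [(String.ofList cs, [base, base + cs.length])]
  else
    (String.ofList (cs.take idx.toNat), [base, base + idx]) ::
      splitGenesGo (cs.drop (idx.toNat + 1)) (base + idx + 1)
termination_by cs.length
decreasing_by
  have h1 := PySem.Chars.neg_one_le_find cs ['/']
  have h2 : (['/'] : List Char) <:+: cs := (PySem.Chars.find_ne_neg_one_iff cs ['/']).mp h
  have h3 := h2.length_le
  simp at h3 ⊢
  omega

def split_genes_alt (token : String) (token_range : List Int) : List (String × List Int) :=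
  splitGenesGo token.toList (PySem.List.pyGetD token_range 0 0)

-- ===== PRECONDITION & SPEC =====
-- token_range[0] raises IndexError on an empty list, in both A and B.
def Pre_split_genes (token : String) (token_range : List Int) : Prop := token_range ≠ []
instance (token : String) (token_range : List Int) : Decidable (Pre_split_genes token token_range) := by unfold Pre_split_genes; infer_instance
def pvWitness_split_genes : String × List Int := ("BRCA1/BRCA2", [10])

def Spec_split_genes (token : String) (token_range : List Int) (out : List (String × List Int)) : Prop := out = split_genes_alt token token_range
instance (token : String) (token_range : List Int) (out : List (String × List Int)) : Decidable (Spec_split_genes token token_range out) := by unfold Spec_split_genes; infer_instance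

-- ===== CLAIM (what is proved, stated in full; the proofs are below) =====
def Claim_equal_split_genes : Prop := ∀ (token : String) (token_range : List Int), Dom_split_genes token token_range → Pre_split_genes token token_range → Spec_split_genes token token_range (split_genes token token_range)

-- ===== LEMMAS AND PROOFS =====

-- splitting on the single char '/', as plain structural recursion
def splitCh : List Char → List (List Char)
  | [] => [[]]
  | c :: t =>
    if c = '/' then [] :: splitCh t
    else match splitCh t with
      | [] => [[c]]
      | s :: ss => (c :: s) :: ss

def consHead (p : List Char) : List (List Char) → List (List Char)
  | [] => [p]
  | s :: ss => (p ++ s) :: ss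

-- A's fold, as structural recursion
def foldA (segs : List String) (start : Int) : List (String × List Int) :=
  match segs with
  | [] => []
  | g :: gs => (g, [start, start + PySem.Str.len g]) :: foldA gs (start + PySem.Str.len g + 1)

lemma splitCh_ne_nil (cs : List Char) : splitCh cs ≠ [] := by
  cases cs with
  | nil => simp [splitCh]
  | cons c t =>
    by_cases hc : c = '/'
    · simp [splitCh, hc]
    · simp only [splitCh, if_neg hc]
      cases splitCh t <;> simp

lemma find_go_shift (cs : List Char) (k : Nat) :
    PySem.Chars.find.go ['/'] cs k =
      if PySem.Chars.find cs ['/'] = -1 then -1 else PySem.Chars.find cs ['/'] + k := by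
  induction cs generalizing k with
  | nil => simp [PySem.Chars.find, PySem.Chars.find.go]
  | cons c t ih =>
    by_cases hc : c = '/'
    · simp [PySem.Chars.find, PySem.Chars.find.go, List.isPrefixOf, hc]
    · have hne : (('/' : Char) == c) = false := by
        simp [beq_iff_eq]; intro h; exact hc h.symm
      have h1 := PySem.Chars.neg_one_le_find t ['/']
      simp only [PySem.Chars.find, PySem.Chars.find.go, List.isPrefixOf, hne, Bool.false_and,
        if_neg (Bool.false_ne_true)] at *
      rw [ih (k+1), ih 1]
      split_ifs with h2 h3 h3 <;> push_cast <;> omega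

lemma consHead_of_ne_nil (p : List Char) (l : List (List Char)) (h : l ≠ []) :
    ∃ s ss, l = s :: ss ∧ consHead p l = (p ++ s) :: ss := by
  obtain ⟨s, ss, rfl⟩ := List.exists_cons_of_ne_nil h
  exact ⟨s, ss, rfl, rfl⟩

lemma splitOn_go_eq (fuel : Nat) (cs cur : List Char) (acc : List (List Char))
    (h : cs.length < fuel) :
    PySem.Chars.splitOn.go ['/'] fuel cs cur acc = acc.reverse ++ consHead cur.reverse (splitCh cs) := by
  induction fuel generalizing cs cur acc with
  | zero => omega
  | succ f ih =>
    cases cs with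
    | nil => simp [PySem.Chars.splitOn.go, splitCh, consHead]
    | cons c t =>
      by_cases hc : c = '/'
      · have hp : (['/'] : List Char).isPrefixOf (c :: t) = true := by
          simp [List.isPrefixOf, hc]
        obtain ⟨s, ss, hss, hch⟩ := consHead_of_ne_nil [] (splitCh t) (splitCh_ne_nil t)
        simp only [PySem.Chars.splitOn.go, hp, if_pos]
        rw [List.length_cons] at h
        rw [show List.drop (['/'] : List Char).length (c :: t) = t from rfl]
        rw [ih t [] (cur.reverse :: acc) (by omega)]
        simp [splitCh, hc, consHead, hch, hss]
      · have hp : (['/'] : List Char).isPrefixOf (c :: t) = false := by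
          simp [List.isPrefixOf, beq_iff_eq]; intro h; exact hc h.symm
        obtain ⟨s, ss, hss, _⟩ := consHead_of_ne_nil [] (splitCh t) (splitCh_ne_nil t)
        simp only [PySem.Chars.splitOn.go, hp, Bool.false_eq_true, if_neg]
        rw [List.length_cons] at h
        rw [ih t (c :: cur) acc (by omega)]
        simp [splitCh, hc, hss, consHead]

lemma splitOn_eq_splitCh (cs : List Char) :
    PySem.Chars.splitOn cs ['/'] = splitCh cs := by
  unfold PySem.Chars.splitOn
  rw [splitOn_go_eq (cs.length + 1) cs [] [] (by omega)]
  obtain ⟨s, ss, hss, hch⟩ := consHead_of_ne_nil [] (splitCh cs) (splitCh_ne_nil cs)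
  simp [hss, consHead]

lemma splitCh_of_find_neg (cs : List Char) (h : PySem.Chars.find cs ['/'] = -1) :
    splitCh cs = [cs] := by
  induction cs with
  | nil => simp [splitCh]
  | cons c t ih =>
    by_cases hc : c = '/'
    · exfalso
      simp [PySem.Chars.find, PySem.Chars.find.go, List.isPrefixOf, hc] at h
    · have hne : (('/' : Char) == c) = false := by
        simp [beq_iff_eq]; intro h; exact hc h.symm
      simp only [PySem.Chars.find, PySem.Chars.find.go, List.isPrefixOf, hne, Bool.false_and,
        if_neg (Bool.false_ne_true)] at h
      rw [find_go_shift t 1] at h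
      have h1 := PySem.Chars.neg_one_le_find t ['/']
      have ht : PySem.Chars.find t ['/'] = -1 := by
        by_contra hcon
        rw [if_neg hcon] at h
        have : (0:Int) ≤ PySem.Chars.find t ['/'] := by
          rcases lt_or_eq_of_le h1 with h2 | h2
          · omega
          · exact absurd h2.symm hcon
        omega
      rw [splitCh, if_neg hc, ih ht]

lemma splitCh_of_find_pos (cs : List Char) (h : PySem.Chars.find cs ['/'] ≠ -1) :
    splitCh cs = cs.take (PySem.Chars.find cs ['/']).toNat ::
      splitCh (cs.drop ((PySem.Chars.find cs ['/']).toNat + 1)) := by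
  induction cs with
  | nil => simp [PySem.Chars.find, PySem.Chars.find.go] at h
  | cons c t ih =>
    by_cases hc : c = '/'
    · subst hc
      have h0 : PySem.Chars.find ('/' :: t) ['/'] = 0 := by
        simp [PySem.Chars.find, PySem.Chars.find.go, List.isPrefixOf]
      rw [h0]
      simp [splitCh]
    · have hne : (('/' : Char) == c) = false := by
        simp [beq_iff_eq]; intro h; exact hc h.symm
      have hstep : PySem.Chars.find (c :: t) ['/'] =
          if PySem.Chars.find t ['/'] = -1 then -1 else PySem.Chars.find t ['/'] + 1 := by
        simp only [PySem.Chars.find, PySem.Chars.find.go, List.isPrefixOf, hne, Bool.false_and,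
          if_neg (Bool.false_ne_true)]
        exact_mod_cast find_go_shift t 1
      have h1 := PySem.Chars.neg_one_le_find t ['/']
      have ht : PySem.Chars.find t ['/'] ≠ -1 := by
        intro hcon; rw [hstep, if_pos hcon] at h; exact h rfl
      have ht0 : (0:Int) ≤ PySem.Chars.find t ['/'] := by
        rcases lt_or_eq_of_le h1 with h2 | h2
        · omega
        · exact absurd h2.symm ht
      have hval : PySem.Chars.find (c :: t) ['/'] = PySem.Chars.find t ['/'] + 1 := by
        rw [hstep, if_neg ht]
      have htn : (PySem.Chars.find (c :: t) ['/']).toNat = (PySem.Chars.find t ['/']).toNat + 1 := by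
        rw [hval]; omega
      rw [htn]
      simp only [List.take_succ_cons, List.drop_succ_cons]
      rw [splitCh, if_neg hc, ih ht]

lemma foldl_eq_foldA (segs : List String) (acc : List (String × List Int)) (start : Int) :
    (segs.foldl
      (fun (st : List (String × List Int) × Int) gene =>
        let gene_end : Int := st.2 + PySem.Str.len gene
        (st.1 ++ [(gene, [st.2, gene_end])], gene_end + 1))
      (acc, start)).1 = acc ++ foldA segs start := by
  induction segs generalizing acc start with
  | nil => simp [foldA]
  | cons g gs ih =>
    simp only [List.foldl_cons, foldA]
    rw [ih]
    simp

lemma go_eq_foldA_len (n : Nat) : ∀ (cs : List Char), cs.length = n → ∀ (base : Int),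
    splitGenesGo cs base = foldA ((splitCh cs).map String.ofList) base := by
  induction n using Nat.strong_induction_on with
  | _ n ih =>
    intro cs hn base
    rw [splitGenesGo]
    by_cases h : PySem.Chars.find cs ['/'] = -1
    · rw [splitCh_of_find_neg cs h]
      simp [h, foldA, PySem.Str.len]
    · rw [splitCh_of_find_pos cs h]
      have h1 := PySem.Chars.neg_one_le_find cs ['/']
      have h0 : (0:Int) ≤ PySem.Chars.find cs ['/'] := by
        rcases lt_or_eq_of_le h1 with h2 | h2
        · omega
        · exact absurd h2.symm h
      have hle := PySem.Chars.find_le_length cs ['/']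
      have hne : cs ≠ [] := by
        intro hnil
        rw [hnil] at h
        exact h (by decide)
      have hlt : (cs.drop ((PySem.Chars.find cs ['/']).toNat + 1)).length < n := by
        have : 0 < cs.length := List.length_pos_of_ne_nil hne
        simp [List.length_drop]
        omega
      have hlen : PySem.Str.len (String.ofList (cs.take (PySem.Chars.find cs ['/']).toNat)) =
          PySem.Chars.find cs ['/'] := by
        simp [PySem.Str.len, PySem.Chars.len, List.length_take]
        omega
      simp only [List.map_cons, foldA, dif_neg h, hlen]
      rw [ih _ hlt _ rfl]

lemma go_eq_foldA (cs : List Char) (base : Int) :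
    splitGenesGo cs base = foldA ((splitCh cs).map String.ofList) base :=
  go_eq_foldA_len cs.length cs rfl base

-- ===== VERDICT (by name: the statement is the Claim_ definition above) =====
theorem split_genes_spec : Claim_equal_split_genes := by
  intro token token_range _ _
  unfold Spec_split_genes split_genes split_genes_alt
  have hsplit : PySem.Str.split? token "/" =
      some ((splitCh token.toList).map String.ofList) := by
    rw [PySem.Str.split?]
    simp [PySem.Chars.split?, splitOn_eq_splitCh]
  rw [hsplit]
  simp only [Option.getD_some]
  rw [foldl_eq_foldA, go_eq_foldA]
  simp
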